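-- pv_equiv track=rewrite | github.com/jan-cogita/ai-sales-trainer-poc | app/services/evaluation.py | _count_question_types
-- ===== SOURCE A (Python) =====
-- OPEN_QUESTION_STARTERS = [
--     "what",
--     "how",
--     "why",
--     "tell me",
--     "describe",
--     "explain",
--     "could you elaborate",
-- ]
--
-- CLOSED_QUESTION_STARTERS = [
--     "do you",
--     "are you",
--     "is it",
--     "have you",
--     "can you",
--     "will you",
--     "did you",
-- ]
--
-- def _count_question_types(user_messages: list[dict]) -> tuple[int, int]:
--     """Count open and closed questions in messages."""
--     open_count = 0
--     closed_count = 0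
--
--     for message in user_messages:
--         content = message.get("content", "").lower().strip()
--         if "?" not in content:
--             continue
--
--         if any(content.startswith(starter) for starter in OPEN_QUESTION_STARTERS):
--             open_count += 1
--         elif any(content.startswith(starter) for starter in CLOSED_QUESTION_STARTERS):
--             closed_count += 1
--         else:
--             open_count += 1  # Default unclear questions to open
--
--     return open_count, closed_count
-- ===== SOURCE B (Python) =====
-- OPEN_QUESTION_STARTERS = [
--     "what",
--     "how",
--     "why",
--     "tell me",
--     "describe",
--     "explain",
--     "could you elaborate",
-- ]
--
-- CLOSED_QUESTION_STARTERS = [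
--     "do you",
--     "are you",
--     "is it",
--     "have you",
--     "can you",
--     "will you",
--     "did you",
-- ]
--
-- def _count_question_types(user_messages: list[dict]) -> tuple[int, int]:
--     """Count open and closed questions in messages."""
--     questions = [
--         c
--         for c in (m.get("content", "").lower().strip() for m in user_messages)
--         if "?" in c
--     ]
--     closed_count = sum(
--         1
--         for c in questions
--         if any(c.startswith(s) for s in CLOSED_QUESTION_STARTERS)
--     )
--     return len(questions) - closed_count, closed_count
-- ===== Notes on version B (the rewrite author's own statement) =====
-- stated objective: alternative
-- what changed: Replaces the per-message three-way if/elif/else updating two counters with two aggregations: total question count and closed count (safe because the open and closed prefix sets are disjoint, so the elif precedence never fires against an open match), deriving open as total minus closed.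
import Mathlib
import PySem

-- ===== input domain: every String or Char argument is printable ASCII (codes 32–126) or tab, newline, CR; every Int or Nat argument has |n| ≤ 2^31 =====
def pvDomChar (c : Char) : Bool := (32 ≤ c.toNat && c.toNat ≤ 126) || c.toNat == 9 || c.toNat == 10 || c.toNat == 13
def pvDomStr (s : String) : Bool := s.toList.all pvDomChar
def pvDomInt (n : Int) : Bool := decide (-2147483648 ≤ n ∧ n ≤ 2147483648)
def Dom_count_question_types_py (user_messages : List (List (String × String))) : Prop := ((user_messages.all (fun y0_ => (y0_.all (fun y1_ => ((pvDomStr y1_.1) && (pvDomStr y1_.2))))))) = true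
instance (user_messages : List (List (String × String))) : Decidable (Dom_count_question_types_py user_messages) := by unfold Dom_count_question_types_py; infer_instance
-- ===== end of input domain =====

-- B replaces A's per-message if/elif/else over two counters by two aggregations (total questions and
-- closed questions, open derived by subtraction); same cost, alternative decomposition.

-- ===== PORT A =====
def pvOpenStarters : List String :=
  ["what", "how", "why", "tell me", "describe", "explain", "could you elaborate"]

def pvClosedStarters : List String :=
  ["do you", "are you", "is it", "have you", "can you", "will you", "did you"]

-- content = message.get("content", "").lower().strip()  (shared by both ports)
def pvContent (message : List (String × String)) : String :=
  PySem.Str.strip (PySem.Str.lower ((PySem.Dict.mk message).getD "content" ""))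

-- the body of A's for-loop, acting on the (open_count, closed_count) pair
def pvStep (acc : Int × Int) (message : List (String × String)) : Int × Int :=
  let content := pvContent message
  if ¬ (PySem.Str.isIn "?" content) then acc
  else if pvOpenStarters.any (fun starter => PySem.Str.startswith content starter) then
    (acc.1 + 1, acc.2)
  else if pvClosedStarters.any (fun starter => PySem.Str.startswith content starter) then
    (acc.1, acc.2 + 1)
  else
    (acc.1 + 1, acc.2)

def count_question_types_py (user_messages : List (List (String × String))) : Int × Int :=
  user_messages.foldl pvStep (0, 0)

-- ===== PORT B =====
def count_question_types_py_alt (user_messages : List (List (String × String))) : Int × Int :=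
  let questions :=
    (user_messages.map pvContent).filter (fun c => PySem.Str.isIn "?" c)
  let closed_count : Int :=
    (questions.countP (fun c =>
      pvClosedStarters.any (fun s => PySem.Str.startswith c s)) : Int)
  ((questions.length : Int) - closed_count, closed_count)

-- ===== PRECONDITION & SPEC =====
def Spec_count_question_types_py (user_messages : List (List (String × String))) (out : Int × Int) : Prop := out = count_question_types_py_alt user_messages
instance (user_messages : List (List (String × String))) (out : Int × Int) : Decidable (Spec_count_question_types_py user_messages out) := by unfold Spec_count_question_types_py; infer_instance

-- ===== CLAIM (what is proved, stated in full; the proofs are below) =====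
def Claim_equal_count_question_types_py : Prop := ∀ (user_messages : List (List (String × String))), Dom_count_question_types_py user_messages → Spec_count_question_types_py user_messages (count_question_types_py user_messages)

-- ===== LEMMAS AND PROOFS =====

-- No open starter and no closed starter is a prefix of the other (49 literal pairs).
lemma pv_starters_incomparable :
    ∀ p ∈ pvOpenStarters.map String.toList, ∀ q ∈ pvClosedStarters.map String.toList,
      ¬ p <+: q ∧ ¬ q <+: p := by decide

-- Disjointness: a string starting with an open starter starts with no closed starter.
lemma pv_disjoint (c : String)
    (h : pvOpenStarters.any (fun starter => PySem.Str.startswith c starter) = true) :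
    pvClosedStarters.any (fun s => PySem.Str.startswith c s) = false := by
  rw [List.any_eq_true] at h
  obtain ⟨p, hp, hps⟩ := h
  rw [Bool.eq_false_iff]
  intro hc
  rw [List.any_eq_true] at hc
  obtain ⟨q, hq, hqs⟩ := hc
  simp only [PySem.Str.startswith_eq] at hps hqs
  rw [PySem.Chars.startswith_iff] at hps hqs
  rcases List.prefix_or_prefix_of_prefix hps hqs with h1 | h1
  · exact (pv_starters_incomparable p.toList (by simpa using ⟨p, hp, rfl⟩)
      q.toList (by simpa using ⟨q, hq, rfl⟩)).1 h1
  · exact (pv_starters_incomparable p.toList (by simpa using ⟨p, hp, rfl⟩)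
      q.toList (by simpa using ⟨q, hq, rfl⟩)).2 h1

-- number of question messages / of closed-question messages in a message list
def pvQ (msgs : List (List (String × String))) : Nat :=
  ((msgs.map pvContent).filter (fun c => PySem.Str.isIn "?" c)).length

def pvC (msgs : List (List (String × String))) : Nat :=
  ((msgs.map pvContent).filter (fun c => PySem.Str.isIn "?" c)).countP
    (fun c => pvClosedStarters.any (fun s => PySem.Str.startswith c s))

lemma pv_fold_eq : ∀ (msgs : List (List (String × String))) (o c : Int),
    msgs.foldl pvStep (o, c) = (o + (pvQ msgs : Int) - (pvC msgs : Int), c + (pvC msgs : Int)) := by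
  intro msgs
  induction msgs with
  | nil => intro o c; simp [pvQ, pvC]
  | cons m rest ih =>
    intro o c
    by_cases hq : PySem.Str.isIn "?" (pvContent m) = true
    · by_cases ho : pvOpenStarters.any (fun starter => PySem.Str.startswith (pvContent m) starter) = true
      · have hcl := pv_disjoint _ ho
        simp only [List.foldl_cons, pvStep, hq, ho, hcl, not_true, Bool.false_eq_true, reduceIte, pvQ, pvC, List.map_cons, List.filter_cons_of_pos,
          List.countP_cons, List.length_cons]
        rw [ih (o + 1) c]
        simp only [pvQ, pvC, Prod.ext_iff]
        constructor <;> (push_cast; ring)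
      · by_cases hcl : pvClosedStarters.any (fun s => PySem.Str.startswith (pvContent m) s) = true
        · simp only [List.foldl_cons, pvStep, hq, ho, hcl, not_true, Bool.false_eq_true, reduceIte, pvQ, pvC, List.map_cons, List.filter_cons_of_pos,
            List.countP_cons, List.length_cons]
          rw [ih o (c + 1)]
          simp only [pvQ, pvC, Prod.ext_iff]
          constructor <;> (push_cast; ring)
        · simp only [Bool.not_eq_true] at ho hcl
          simp only [List.foldl_cons, pvStep, hq, ho, hcl, not_true, Bool.false_eq_true,
            reduceIte, pvQ, pvC, List.map_cons, List.filter_cons_of_pos,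
            List.countP_cons, List.length_cons]
          rw [ih (o + 1) c]
          simp only [pvQ, pvC, Prod.ext_iff]
          constructor <;> (push_cast; ring)
    · simp only [List.foldl_cons, pvStep, hq, pvQ, pvC, List.map_cons]
      rw [List.filter_cons_of_neg (by simpa using hq)]
      exact ih o c

-- ===== VERDICT (by name: the statement is the Claim_ definition above) =====
theorem count_question_types_py_spec : Claim_equal_count_question_types_py := by
  intro msgs _
  unfold Spec_count_question_types_py count_question_types_py count_question_types_py_alt
  rw [pv_fold_eq msgs 0 0]
  simp [pvQ, pvC]
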